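-- pv_equiv track=rewrite | github.com/OttoEnevoldsen/HashGuard | main.py | iterative_hash
-- ===== SOURCE A (Python) =====
-- def iterative_hash(output: str, rounds: int) -> str:
--     """
--     Apply multiple rounds of hashing.
--
--     Parameters:
--     output (str): The initial output to be hashed.
--     rounds (int): The number of rounds for hashing.
--
--     Returns:
--     str: The hashed output after multiple rounds.
--     """
--     for _ in range(rounds):
--         new_output = ""
--         unique_value = sum(ord(c) for c in output)
--         for i in range(len(output)):
--             unique_value += i
--             new_output += chr(((ord(output[i * unique_value % len(output)]) * unique_value // (i + 1)) % 95) + 32)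
--         output = new_output
--     return output
-- ===== SOURCE B (Python) =====
-- def _round(s):
--     n = len(s)
--     base = sum(map(ord, s))
--     out = []
--     for i in range(n):
--         u = base + i * (i + 1) // 2
--         out.append(chr(((ord(s[i * u % n]) * u // (i + 1)) % 95) + 32))
--     return ''.join(out)
--
-- def iterative_hash(output: str, rounds: int) -> str:
--     # Cycle detection: remember every state seen; on a repeat, jump straight
--     # to the answer with modular arithmetic instead of iterating further.
--     seen = {}
--     trajectory = []
--     r = 0
--     while r < rounds:
--         if output in seen:
--             i = seen[output]
--             return trajectory[i + (rounds - r) % (r - i)]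
--         seen[output] = r
--         trajectory.append(output)
--         output = _round(output)
--         r += 1
--     return output
-- ===== Notes on version B (the rewrite author's own statement) =====
-- stated objective: alternative
-- what changed: B adds cycle detection over the sequence of round states: it memoizes every state with the step it first appeared and, on a repeat, returns the stored trajectory entry at index i + (rounds - r) % (r - i) instead of iterating the remaining rounds; the round itself computes each index's multiplier in closed form (base + i*(i+1)//2) rather than via A's running accumulator.
import Mathlib
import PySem

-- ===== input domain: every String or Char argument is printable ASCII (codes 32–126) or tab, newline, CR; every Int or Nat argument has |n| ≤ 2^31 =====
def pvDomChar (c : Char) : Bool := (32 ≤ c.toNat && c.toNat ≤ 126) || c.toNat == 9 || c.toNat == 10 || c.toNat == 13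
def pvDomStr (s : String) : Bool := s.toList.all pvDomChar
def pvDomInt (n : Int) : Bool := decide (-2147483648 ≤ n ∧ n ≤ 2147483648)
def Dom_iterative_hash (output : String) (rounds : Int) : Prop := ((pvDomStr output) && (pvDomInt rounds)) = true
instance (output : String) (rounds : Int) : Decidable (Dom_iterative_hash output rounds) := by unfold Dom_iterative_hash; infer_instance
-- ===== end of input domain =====

-- B replaces A's blind repetition of the round function by cycle detection over the
-- sequence of states (memoize each state, jump to the answer modulo the cycle length),
-- and computes the per-index multiplier in closed form (alternative algorithm).

-- ===== PORT A =====
-- one round of A's inner loop: fold over indices carrying (new_output, unique_value)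
def iaRoundA (s : List Char) : List Char :=
  let base : Int := (s.map (fun c => (c.toNat : Int))).sum
  ((List.range s.length).foldl
    (fun (st : List Char × Int) (i : Nat) =>
      let u := st.2 + (i : Int)
      let c := (PySem.List.pyGet? s (PySem.Int.mod ((i : Int) * u) (s.length : Int))).getD ' '
      (st.1 ++ [Char.ofNat (PySem.Int.mod (PySem.Int.floordiv ((c.toNat : Int) * u) ((i : Int) + 1)) 95 + 32).toNat], u))
    ([], base)).1

def iterative_hash (output : String) (rounds : Int) : String :=
  String.ofList (iaRoundA^[rounds.toNat] output.toList)

-- ===== PORT B =====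
-- Source B's _round: multiplier in closed form base + i*(i+1)//2, built index by index
def iaRoundB (s : List Char) : List Char :=
  let base : Int := (s.map (fun c => (c.toNat : Int))).sum
  (List.range s.length).map (fun (i : Nat) =>
    let u := base + PySem.Int.floordiv ((i : Int) * ((i : Int) + 1)) 2
    let c := (PySem.List.pyGet? s (PySem.Int.mod ((i : Int) * u) (s.length : Int))).getD ' '
    Char.ofNat (PySem.Int.mod (PySem.Int.floordiv ((c.toNat : Int) * u) ((i : Int) + 1)) 95 + 32).toNat)

def iaRoundBs (s : String) : String := String.ofList (iaRoundB s.toList)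

-- Source B's while loop: rem = rounds - r rounds still to do; seen maps a state to the
-- step at which it first appeared, trajectory lists the states in order; on a repeat
-- the answer is read off the trajectory modulo the cycle length (index provably in
-- range, so getD "" is exact)
def iaLoop : Nat → Nat → PySem.Dict String Nat → List String → String → String
  | 0, _, _, _, out => out
  | rem + 1, r, seen, traj, out =>
    match seen.get? out with
    | some i => traj.getD (i + (rem + 1) % (r - i)) ""
    | none => iaLoop rem (r + 1) (seen.insert out r) (traj ++ [out]) (iaRoundBs out)

def iterative_hash_alt (output : String) (rounds : Int) : String :=
  iaLoop rounds.toNat 0 PySem.Dict.empty [] output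

-- ===== PRECONDITION & SPEC =====
def Spec_iterative_hash (output : String) (rounds : Int) (out : String) : Prop := out = iterative_hash_alt output rounds
instance (output : String) (rounds : Int) (out : String) : Decidable (Spec_iterative_hash output rounds out) := by unfold Spec_iterative_hash; infer_instance

-- ===== CLAIM (what is proved, stated in full; the proofs are below) =====
def Claim_equal_iterative_hash : Prop := ∀ (output : String) (rounds : Int), Dom_iterative_hash output rounds → Spec_iterative_hash output rounds (iterative_hash output rounds)

-- ===== LEMMAS AND PROOFS =====

-- triangular numbers, recursively: tri k = 0 + 1 + … + (k-1)
def tri : Nat → Int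
  | 0 => 0
  | k + 1 => tri k + k

theorem two_mul_tri (k : Nat) : 2 * tri (k + 1) = (k : Int) * (k + 1) := by
  induction k with
  | zero => simp [tri]
  | succ n ih =>
    show 2 * (tri (n + 1) + (n + 1 : Nat)) = _
    push_cast
    push_cast at ih
    linarith

theorem tri_closed (k : Nat) :
    PySem.Int.floordiv ((k : Int) * ((k : Int) + 1)) 2 = tri (k + 1) := by
  rw [PySem.Int.floordiv_eq_ediv_of_pos (by norm_num)]
  have h := two_mul_tri k
  push_cast at h ⊢
  rw [← h]
  exact Int.mul_ediv_cancel_left _ (by norm_num)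

-- invariant of A's inner fold: after k steps the accumulator is base + tri k and the
-- string built so far is B's map over the first k indices
theorem fold_inv (s : List Char) (k : Nat) :
    (List.range k).foldl
      (fun (st : List Char × Int) (i : Nat) =>
        let u := st.2 + (i : Int)
        let c := (PySem.List.pyGet? s (PySem.Int.mod ((i : Int) * u) (s.length : Int))).getD ' '
        (st.1 ++ [Char.ofNat (PySem.Int.mod (PySem.Int.floordiv ((c.toNat : Int) * u) ((i : Int) + 1)) 95 + 32).toNat], u))
      ([], (s.map (fun c => (c.toNat : Int))).sum)
    = ((List.range k).map (fun (i : Nat) =>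
        let u := (s.map (fun c => (c.toNat : Int))).sum + PySem.Int.floordiv ((i : Int) * ((i : Int) + 1)) 2
        let c := (PySem.List.pyGet? s (PySem.Int.mod ((i : Int) * u) (s.length : Int))).getD ' '
        Char.ofNat (PySem.Int.mod (PySem.Int.floordiv ((c.toNat : Int) * u) ((i : Int) + 1)) 95 + 32).toNat),
       (s.map (fun c => (c.toNat : Int))).sum + tri k) := by
  induction k with
  | zero => simp [tri]
  | succ n ih =>
    rw [List.range_succ, List.foldl_append, List.map_append, ih]
    simp only [List.foldl_cons, List.foldl_nil, List.map_cons, List.map_nil]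
    have hu : (s.map (fun c => (c.toNat : Int))).sum + tri n + (n : Int)
        = (s.map (fun c => (c.toNat : Int))).sum
          + PySem.Int.floordiv ((n : Int) * ((n : Int) + 1)) 2 := by
      rw [tri_closed]; show _ = _ + (tri n + (n : Int)); ring
    simp only [hu, tri]
    refine Prod.ext_iff.mpr ⟨rfl, ?_⟩
    rw [tri_closed]
    simp [tri]

theorem iaRound_eq : iaRoundA = iaRoundB := by
  funext s
  simp only [iaRoundA, iaRoundB]
  exact congrArg Prod.fst (fold_inv s s.length)

-- iterating the round on strings = iterating it on char lists
theorem iterate_mk (n : Nat) (s : String) :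
    iaRoundBs^[n] s = String.ofList (iaRoundB^[n] s.toList) := by
  induction n generalizing s with
  | zero => simp [String.ofList_toList]
  | succ m ih =>
    rw [Function.iterate_succ_apply, Function.iterate_succ_apply, ih]
    simp [iaRoundBs, String.toList_ofList]

-- once the trajectory repeats (f^[i+p] x = f^[i] x), indices collapse mod p
theorem iterate_period {α : Type} (f : α → α) (x : α) (i p : Nat) (hp : 0 < p)
    (h : f^[i + p] x = f^[i] x) : ∀ m, f^[i + m] x = f^[i + m % p] x := by
  intro m
  induction m using Nat.strong_induction_on with
  | _ m ih =>
    by_cases hm : m < p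
    · rw [Nat.mod_eq_of_lt hm]
    · have hpm : p ≤ m := le_of_not_gt hm
      have h1 : f^[i + m] x = f^[i + (m - p)] x := by
        have he : i + m = (m - p) + (i + p) := by omega
        rw [he, Function.iterate_add_apply, h, ← Function.iterate_add_apply]
        congr 1; omega
      have h2 := ih (m - p) (by omega)
      have h3 : (m - p) % p = m % p := by
        conv_rhs => rw [← Nat.sub_add_cancel hpm, Nat.add_mod_right]
      rw [h1, h2, h3]

-- the cycle-detecting loop computes the plain iterate, given its invariants
theorem iaLoop_eq (s0 : String) : ∀ (rem r : Nat) (seen : PySem.Dict String Nat)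
    (traj : List String) (out : String),
    out = iaRoundBs^[r] s0 →
    traj.length = r →
    (∀ k, k < r → traj.getD k "" = iaRoundBs^[k] s0) →
    (∀ x i, seen.get? x = some i → i < r ∧ iaRoundBs^[i] s0 = x) →
    iaLoop rem r seen traj out = iaRoundBs^[rem + r] s0 := by
  intro rem
  induction rem with
  | zero => intro r seen traj out hout _ _ _; simpa [iaLoop] using hout
  | succ m ih =>
    intro r seen traj out hout hlen htraj hseen
    cases hget : seen.get? out with
    | some i =>
      obtain ⟨hir, hfi⟩ := hseen out i hget
      have hp : 0 < r - i := by omega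
      have hper : iaRoundBs^[i + (r - i)] s0 = iaRoundBs^[i] s0 := by
        rw [show i + (r - i) = r from by omega, hfi, ← hout]
      have hidx : i + (m + 1) % (r - i) < r := by
        have := Nat.mod_lt (m + 1) hp; omega
      have hgoal := iterate_period iaRoundBs s0 i (r - i) hp hper (m + 1 + (r - i))
      rw [Nat.add_mod_right] at hgoal
      simp only [iaLoop, hget]
      rw [htraj _ hidx, ← hgoal, show i + (m + 1 + (r - i)) = m + 1 + r from by omega]
    | none =>
      simp only [iaLoop, hget]
      rw [ih (r + 1) (seen.insert out r) (traj ++ [out]) (iaRoundBs out)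
          (by rw [hout]; exact (Function.iterate_succ_apply' _ _ _).symm)
          (by simp [hlen])
          (by
            intro k hk
            rcases Nat.lt_succ_iff_lt_or_eq.mp hk with hk' | hk'
            · rw [← htraj k hk']
              simp [List.getD, List.getElem?_append_left (hlen ▸ hk')]
            · subst hk'
              rw [← hlen]
              simp [List.getD, hout, hlen]
          )
          (by
            intro x j hj
            rw [PySem.Dict.get?_insert] at hj
            split_ifs at hj with hx
            · cases hj; subst hx; exact ⟨by omega, hout.symm⟩
            · obtain ⟨h1, h2⟩ := hseen x j hj; exact ⟨by omega, h2⟩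
          ),
        show m + (r + 1) = m + 1 + r from by omega]

-- ===== VERDICT (by name: the statement is the Claim_ definition above) =====
theorem iterative_hash_spec : Claim_equal_iterative_hash := by
  intro output rounds _
  unfold Spec_iterative_hash iterative_hash iterative_hash_alt
  rw [iaLoop_eq output rounds.toNat 0 PySem.Dict.empty [] output rfl rfl
      (by intro k hk; omega) (by intro x i h; simp [PySem.Dict.get?_empty] at h)]
  rw [Nat.add_zero, iterate_mk, iaRound_eq]
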